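-- pv_equiv track=rewrite | github.com/MrBrantCode/unitest_baseline | mut_generate/mist_train_taco/taco_7565/solution.py | can_form_k_repeated_substring
-- ===== SOURCE A (Python) =====
-- def can_form_k_repeated_substring(S, N, K):
--     if N % K != 0:
--         return 0
--
--     pat = S[0:K]
--     (cnt, cnt2) = (0, 0)
--     pat2 = ''
--
--     for i in range(0, N, K):
--         if pat == S[i:i + K]:
--             cnt += 1
--         elif pat2 == '':
--             pat2 = S[i:i + K]
--             cnt2 += 1
--         elif pat2 == S[i:i + K]:
--             cnt2 += 1
--
--     if (cnt <= 1 or cnt2 <= 1) and cnt + cnt2 == N // K: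
--         return 1
--
--     return 0
-- ===== SOURCE B (Python) =====
-- from collections import Counter
--
-- def can_form_k_repeated_substring(S, N, K):
--     if N % K != 0:
--         return 0
--     blocks = [S[i:i + K] for i in range(0, N, K)]
--     if len(blocks) != N // K:
--         return 0
--     counts = Counter(blocks)
--     if len(counts) <= 1:
--         return 1
--     if len(counts) == 2 and 1 in counts.values():
--         return 1
--     return 0
-- ===== Notes on version B (the rewrite author's own statement) =====
-- stated objective: simpler
-- what changed: A's single-pass running scan with pat/pat2 state variables and a '' sentinel is replaced by building the block list once, taking its Counter, and deciding from the frequency table alone (at most one distinct block, or exactly two with one of them occurring once).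
-- outside the precondition, e.g. on can_form_k_repeated_substring('abab', 4, 0): A raises ZeroDivisionError, B raises ZeroDivisionError
import Mathlib
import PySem

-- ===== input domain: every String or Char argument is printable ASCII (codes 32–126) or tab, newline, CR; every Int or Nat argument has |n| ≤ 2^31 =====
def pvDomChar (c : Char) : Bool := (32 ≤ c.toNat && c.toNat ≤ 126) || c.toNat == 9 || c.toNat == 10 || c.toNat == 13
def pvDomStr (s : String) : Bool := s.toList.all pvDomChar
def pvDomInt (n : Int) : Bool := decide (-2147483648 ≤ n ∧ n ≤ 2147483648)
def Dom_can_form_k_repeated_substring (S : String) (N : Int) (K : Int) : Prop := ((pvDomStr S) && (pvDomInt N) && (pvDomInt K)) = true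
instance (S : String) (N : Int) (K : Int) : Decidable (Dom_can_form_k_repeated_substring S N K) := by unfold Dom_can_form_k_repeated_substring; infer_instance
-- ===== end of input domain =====

-- B replaces A's running two-pattern scan (pat/pat2 with a '' sentinel) by building the block
-- list once, taking its Counter, and deciding from the frequency table alone (objective: simpler).

-- ===== PORT A =====
-- loop body of A's for-loop, named so the proofs can speak about one step
def pvStepA (pat : String) (st : Int × Int × String) (b : String) : Int × Int × String :=
  if pat = b then (st.1 + 1, st.2.1, st.2.2)
  else if st.2.2 = "" then (st.1, st.2.1 + 1, b)
  else if st.2.2 = b then (st.1, st.2.1 + 1, st.2.2)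
  else st

def can_form_k_repeated_substring (S : String) (N : Int) (K : Int) : Int :=
  if PySem.Int.mod N K ≠ 0 then 0
  else
    let pat := PySem.Str.slice S (some 0) (some K)
    let st := (PySem.List.pyRange 0 N K).foldl
      (fun st i => pvStepA pat st (PySem.Str.slice S (some i) (some (i + K)))) (0, 0, "")
    if (st.1 ≤ 1 ∨ st.2.1 ≤ 1) ∧ st.1 + st.2.1 = PySem.Int.floordiv N K then 1 else 0

-- ===== PORT B =====
def can_form_k_repeated_substring_alt (S : String) (N : Int) (K : Int) : Int :=
  if PySem.Int.mod N K ≠ 0 then 0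
  else
    let blocks := (PySem.List.pyRange 0 N K).map
      (fun i => PySem.Str.slice S (some i) (some (i + K)))
    if (blocks.length : Int) ≠ PySem.Int.floordiv N K then 0
    else
      let counts := PySem.Dict.counter blocks
      if counts.size ≤ 1 then 1
      else if counts.size = 2 ∧ counts.values.contains (1 : Int) then 1
      else 0

-- ===== PRECONDITION & SPEC =====
-- Pre_ excludes only K = 0, on which the Python A (and B) raise ZeroDivisionError at 'N % K'.
def Pre_can_form_k_repeated_substring (S : String) (N : Int) (K : Int) : Prop := K ≠ 0
instance (S : String) (N : Int) (K : Int) : Decidable (Pre_can_form_k_repeated_substring S N K) := by unfold Pre_can_form_k_repeated_substring; infer_instance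
def pvWitness_can_form_k_repeated_substring : String × Int × Int := ("abab", 4, 2)
def Spec_can_form_k_repeated_substring (S : String) (N : Int) (K : Int) (out : Int) : Prop := out = can_form_k_repeated_substring_alt S N K
instance (S : String) (N : Int) (K : Int) (out : Int) : Decidable (Spec_can_form_k_repeated_substring S N K out) := by unfold Spec_can_form_k_repeated_substring; infer_instance

-- ===== CLAIM (what is proved, stated in full; the proofs are below) =====
def Claim_equal_can_form_k_repeated_substring : Prop := ∀ (S : String) (N : Int) (K : Int), Dom_can_form_k_repeated_substring S N K → Pre_can_form_k_repeated_substring S N K → Spec_can_form_k_repeated_substring S N K (can_form_k_repeated_substring S N K)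

-- ===== LEMMAS AND PROOFS =====

-- A's loop state after processing a prefix P: (count of pat, count of the first non-pat block, that block or "")
def pvState (pat : String) (P : List String) : Int × Int × String :=
  ((P.count pat : Int),
   (match P.find? (fun b => b != pat) with
    | none => 0
    | some v => (P.count v : Int)),
   (P.find? (fun b => b != pat)).getD "")

-- "once a block is empty, all later blocks are empty" (true of the actual block lists; A's '' sentinel is only benign because of it)
def pvSP (L : List String) : Prop := ∀ p e r, L = p ++ e :: r → "" ∈ p → e = ""

lemma pvStepA_state (pat e : String) (P : List String) (he : "" ∈ P → e = "") :
    pvStepA pat (pvState pat P) e = pvState pat (P ++ [e]) := by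
  have hfind : (P ++ [e]).find? (fun b => b != pat)
      = ((P.find? (fun b => b != pat)).or ([e].find? (fun b => b != pat))) := List.find?_append
  by_cases hpe : pat = e
  · subst hpe
    have h1 : ([pat].find? (fun b => b != pat)) = none := by simp
    cases hf : P.find? (fun b => b != pat) with
    | none =>
      simp [pvStepA, pvState, hfind, hf, h1, List.count_append]
    | some v =>
      have hv : v ≠ pat := by simpa using List.find?_some hf
      simp [pvStepA, pvState, hfind, hf, h1, List.count_append, hv, Ne.symm hv]
  · have hep : e ≠ pat := fun h => hpe h.symm
    have h1 : ([e].find? (fun b => b != pat)) = some e := by simp [hep]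
    cases hf : P.find? (fun b => b != pat) with
    | none =>
      have hall : ∀ x ∈ P, x = pat := by
        intro x hx
        have := List.find?_eq_none.mp hf x hx
        simpa using this
      have hcnt_e : P.count e = 0 :=
        List.count_eq_zero.mpr (fun hmem => hep (hall e hmem))
      simp [pvStepA, pvState, hfind, hf, h1, List.count_append, hpe, hep, hcnt_e]
    | some v =>
      have hv : v ≠ pat := by simpa using List.find?_some hf
      have hvP : v ∈ P := List.mem_of_find?_eq_some hf
      by_cases hv0 : v = ""
      · have he0 : e = "" := he (hv0 ▸ hvP)
        have hve : v = e := hv0.trans he0.symm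
        subst hve
        have hp0 : pat ≠ "" := hv0 ▸ hpe
        simp [pvStepA, pvState, hfind, hf, h1, List.count_append, hpe, hep, hv0, hp0,
          Ne.symm hp0]
      · by_cases hve : v = e
        · subst hve
          simp [pvStepA, pvState, hfind, hf, h1, List.count_append, hpe, hep, hv0]
        · have hev : e ≠ v := fun h => hve h.symm
          simp [pvStepA, pvState, hfind, hf, h1, List.count_append, hpe, hep, hv0, hve, hev,
            Ne.symm hev]

lemma pvFold_state (pat : String) (rest : List String) : ∀ P : List String, pvSP (P ++ rest) →
    rest.foldl (pvStepA pat) (pvState pat P) = pvState pat (P ++ rest) := by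
  induction rest with
  | nil => intro P _; simp
  | cons e rest ih =>
    intro P hSP
    have he : "" ∈ P → e = "" := fun h => hSP P e rest rfl h
    have h2 : pvSP ((P ++ [e]) ++ rest) := by simpa using hSP
    simp only [List.foldl_cons, pvStepA_state pat e P he]
    rw [ih (P ++ [e]) h2]
    simp

lemma pvCount2 (L : List String) (a b : String) (hab : a ≠ b)
    (h : ∀ x ∈ L, x = a ∨ x = b) : L.count a + L.count b = L.length := by
  induction L with
  | nil => simp
  | cons x t ih =>
    have hx := h x (by simp)
    have ht : ∀ y ∈ t, y = a ∨ y = b := fun y hy => h y (by simp [hy])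
    have := ih ht
    rcases hx with rfl | rfl <;> simp [List.count_cons, beq_iff_eq] <;>
      simp [hab, Ne.symm hab] <;> omega

lemma pvCount2' (L : List String) (a b : String) (hab : a ≠ b) :
    L.count a + L.count b ≤ L.length := by
  induction L with
  | nil => simp
  | cons x t ih =>
    simp only [List.count_cons, List.length_cons, beq_iff_eq]
    split_ifs with h1 h2
    · exact absurd (h1.symm.trans h2) hab
    all_goals omega

lemma pvCount3 (L : List String) (a b c : String) (hab : a ≠ b) (hca : c ≠ a) (hcb : c ≠ b)
    (hc : c ∈ L) : L.count a + L.count b < L.length := by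
  induction L with
  | nil => simp at hc
  | cons x t ih =>
    rcases List.mem_cons.mp hc with rfl | hct
    · have h := pvCount2' t a b hab
      simp only [List.count_cons, List.length_cons, beq_iff_eq, hca, hcb, if_false]
      omega
    · have := ih hct
      simp only [List.count_cons, List.length_cons, beq_iff_eq]
      split_ifs with g1 g2
      · exact absurd (g1.symm.trans g2) hab
      all_goals omega

-- the list-level heart: A's scan verdict = B's frequency-table verdict, on any SP list headed by pat
lemma pvMain (pat : String) (t : List String) (hSP : pvSP (pat :: t)) :
    (let st := (pat :: t).foldl (pvStepA pat) ((0 : Int), (0 : Int), "");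
     if (st.1 ≤ 1 ∨ st.2.1 ≤ 1) ∧ st.1 + st.2.1 = ((pat :: t).length : Int) then (1 : Int) else 0)
    = (let counts := PySem.Dict.counter (pat :: t);
       if counts.size ≤ 1 then (1 : Int)
       else if counts.size = 2 ∧ counts.values.contains (1 : Int) then 1 else 0) := by
  have hst : (pat :: t).foldl (pvStepA pat) ((0 : Int), (0 : Int), "") = pvState pat (pat :: t) := by
    have h0 : pvState pat [] = ((0 : Int), (0 : Int), "") := rfl
    have h := pvFold_state pat (pat :: t) [] (by simpa using hSP)
    rw [h0] at h
    simpa using h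
  simp only [hst]
  have hofl : PySem.Set.ofList (pat :: t) = pat :: (PySem.Set.ofList t).discard pat :=
    PySem.Set.ofList_cons _ _
  have hsize : (PySem.Dict.counter (pat :: t)).size
      = ((PySem.Set.ofList t).discard pat).length + 1 := by
    simp [PySem.Dict.size, PySem.Dict.items_counter, hofl]
  have hvals : (PySem.Dict.counter (pat :: t)).values
      = (pat :: (PySem.Set.ofList t).discard pat).map (fun k => ((pat :: t).count k : Int)) := by
    simp only [PySem.Dict.values, PySem.Dict.items_counter, hofl, List.map_map]
    rfl
  have hmemd : ∀ x, x ∈ (PySem.Set.ofList t).discard pat ↔ x ∈ t ∧ x ≠ pat := by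
    intro x
    rw [PySem.Set.mem_discard, PySem.Set.mem_ofList]
  rcases hd2 : (PySem.Set.ofList t).discard pat with _ | ⟨v, d''⟩
  · -- one distinct block: everything equals pat
    have hall : ∀ x ∈ pat :: t, x = pat := by
      intro x hx
      rcases List.mem_cons.mp hx with rfl | hx'
      · rfl
      · by_contra hne
        have : x ∈ (PySem.Set.ofList t).discard pat := (hmemd x).mpr ⟨hx', hne⟩
        rw [hd2] at this
        simp at this
    have hfind : (pat :: t).find? (fun b => b != pat) = none := by
      rw [List.find?_eq_none]
      intro x hx
      simp [hall x hx]
    have hcnt : (pat :: t).count pat = (pat :: t).length :=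
      List.count_eq_length.mpr (fun b hb => (hall b hb).symm)
    rw [hd2] at hsize
    simp only [pvState, hfind, hcnt, hsize]
    norm_num
  · rcases hd3 : d'' with _ | ⟨w, d3⟩
    · -- exactly two distinct blocks: pat and v
      rw [hd3] at hd2
      have hv : v ∈ t ∧ v ≠ pat := (hmemd v).mp (by rw [hd2]; simp)
      have hdich : ∀ x ∈ pat :: t, x = pat ∨ x = v := by
        intro x hx
        rcases List.mem_cons.mp hx with rfl | hx'
        · exact Or.inl rfl
        · by_cases hxp : x = pat
          · exact Or.inl hxp
          · have : x ∈ (PySem.Set.ofList t).discard pat := (hmemd x).mpr ⟨hx', hxp⟩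
            rw [hd2] at this
            simp at this
            exact Or.inr this
      have hiss : (t.find? (fun b => b != pat)).isSome := by
        rw [List.find?_isSome]
        exact ⟨v, hv.1, by simp [hv.2]⟩
      obtain ⟨u, hu⟩ := Option.isSome_iff_exists.mp hiss
      have hup : u ≠ pat := by simpa using List.find?_some hu
      have huv : u = v := by
        rcases hdich u (List.mem_cons_of_mem _ (List.mem_of_find?_eq_some hu)) with h | h
        · exact absurd h hup
        · exact h
      subst huv
      have hfind : (pat :: t).find? (fun b => b != pat) = some u := by
        rw [List.find?_cons]
        simp [hu]
      have hsum : (pat :: t).count pat + (pat :: t).count u = (pat :: t).length :=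
        pvCount2 _ _ _ (fun h => hv.2 h.symm) hdich
      have h1 : 1 ≤ (pat :: t).count pat := List.count_pos_iff.mpr (List.mem_cons_self)
      have h2 : 1 ≤ (pat :: t).count u :=
        List.count_pos_iff.mpr (List.mem_cons_of_mem _ hv.1)
      rw [hd2] at hsize hvals
      norm_num at hsize
      simp only [pvState, hfind, hvals]
      have hcond1 : (((pat :: t).count pat : Int) ≤ 1 ∨ ((pat :: t).count u : Int) ≤ 1) ∧
          ((pat :: t).count pat : Int) + ((pat :: t).count u : Int) = ((pat :: t).length : Int)
          ↔ ((pat :: t).count pat = 1 ∨ (pat :: t).count u = 1) := by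
        constructor
        · rintro ⟨hor, _⟩
          rcases hor with h | h
          · exact Or.inl (by omega)
          · exact Or.inr (by omega)
        · intro hor
          constructor
          · rcases hor with h | h
            · exact Or.inl (by omega)
            · exact Or.inr (by omega)
          · omega
      rw [if_congr hcond1 rfl rfl]
      have hcont : (([pat, u].map (fun k => ((pat :: t).count k : Int))).contains (1 : Int))
          = true ↔ ((pat :: t).count pat = 1 ∨ (pat :: t).count u = 1) := by
        rw [List.contains_iff_mem]
        simp only [List.map_cons, List.map_nil, List.mem_cons, List.not_mem_nil, or_false]
        constructor <;> rintro (h | h)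
        · exact Or.inl (by omega)
        · exact Or.inr (by omega)
        · exact Or.inl (by omega)
        · exact Or.inr (by omega)
      rw [hsize]
      rw [if_neg (by norm_num : ¬ (2 : Nat) ≤ 1)]
      have hcond2 : ((2 : Nat) = 2 ∧
          (([pat, u].map (fun k => ((pat :: t).count k : Int))).contains (1 : Int)) = true)
          ↔ ((pat :: t).count pat = 1 ∨ (pat :: t).count u = 1) :=
        ⟨fun h => hcont.mp h.2, fun h => ⟨rfl, hcont.mpr h⟩⟩
      rw [if_congr hcond2 rfl rfl]
    · -- three or more distinct blocks
      rw [hd3] at hd2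
      have hv : v ∈ t ∧ v ≠ pat := (hmemd v).mp (by rw [hd2]; simp)
      have hw : w ∈ t ∧ w ≠ pat := (hmemd w).mp (by rw [hd2]; simp)
      have hvw : v ≠ w := by
        have hnd : ((PySem.Set.ofList t).discard pat).Nodup :=
          PySem.Set.nodup_discard _ _ (PySem.Set.nodup_ofList t)
        rw [hd2] at hnd
        intro h
        exact (List.nodup_cons.mp hnd).1 (by rw [h]; exact List.mem_cons_self)
      have hiss : (t.find? (fun b => b != pat)).isSome := by
        rw [List.find?_isSome]
        exact ⟨v, hv.1, by simp [hv.2]⟩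
      obtain ⟨u, hu⟩ := Option.isSome_iff_exists.mp hiss
      have hup : u ≠ pat := by simpa using List.find?_some hu
      have hfind : (pat :: t).find? (fun b => b != pat) = some u := by
        rw [List.find?_cons]
        simp [hu]
      -- pick z ∈ {v, w} with z ≠ u
      obtain ⟨z, hz⟩ : ∃ z, z ∈ t ∧ z ≠ pat ∧ z ≠ u := by
        by_cases huv : u = v
        · exact ⟨w, hw.1, hw.2, fun h => hvw (by rw [← huv]; exact h.symm)⟩
        · exact ⟨v, hv.1, hv.2, fun h => huv h.symm⟩
      have hlt : (pat :: t).count pat + (pat :: t).count u < (pat :: t).length :=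
        pvCount3 _ _ _ z (fun h => hup h.symm) hz.2.1 hz.2.2
          (List.mem_cons_of_mem _ hz.1)
      rw [hd2] at hsize
      simp only [pvState, hfind, hsize]
      rw [if_neg (by push_cast; omega), if_neg (by simp only [List.length_cons]; omega),
        if_neg (by simp only [List.length_cons]; omega)]

-- pyRange 0 N K, when K ∣ N, is exactly the multiples K*0 .. K*(q-1), q = N//K
lemma pvRange_spec (N K : Int) (hK : K ≠ 0) (hm : PySem.Int.mod N K = 0) :
    PySem.List.pyRange 0 N K
      = (List.range (PySem.Int.floordiv N K).toNat).map (fun (k : Nat) => K * (k : Int)) := by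
  obtain ⟨q, hq⟩ : K ∣ N := (PySem.Int.mod_eq_zero_iff_dvd N K).mp hm
  have hfd : PySem.Int.floordiv N K = q := by
    have h := PySem.Int.floordiv_mul_add_mod N K
    rw [hm, add_zero] at h
    have h2 : PySem.Int.floordiv N K * K = q * K := by rw [h, hq]; ring
    exact mul_right_cancel₀ hK h2
  have hcount : (if 0 < K then (if 0 < N then ((N - 0 + K - 1) / K).toNat else 0)
      else (if N < 0 then ((0 - N + -K - 1) / -K).toNat else 0)) = q.toNat := by
    rcases lt_trichotomy K 0 with hK1 | hK1 | hK1
    · rw [if_neg (by omega)]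
      by_cases hN : N < 0
      · rw [if_pos hN]
        have hqpos : 0 < q := by
          by_contra hqn
          push_neg at hqn
          have : 0 ≤ K * q := by nlinarith
          omega
        have he : 0 - N + -K - 1 = (-K - 1) + q * -K := by rw [hq]; ring
        rw [he, Int.add_mul_ediv_right _ _ (by omega : -K ≠ 0),
          Int.ediv_eq_zero_of_lt (by omega) (by omega)]
        omega
      · rw [if_neg hN]
        have hqn : q ≤ 0 := by
          by_contra hqp
          push_neg at hqp
          have : K * q < 0 := mul_neg_of_neg_of_pos hK1 hqp
          omega
        omega
    · exact absurd hK1 hK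
    · rw [if_pos hK1]
      by_cases hN : 0 < N
      · rw [if_pos hN]
        have hqpos : 0 < q := by
          by_contra hqn
          push_neg at hqn
          have : K * q ≤ 0 := mul_nonpos_of_nonneg_of_nonpos hK1.le hqn
          omega
        have he : N - 0 + K - 1 = (K - 1) + q * K := by rw [hq]; ring
        rw [he, Int.add_mul_ediv_right _ _ hK, Int.ediv_eq_zero_of_lt (by omega) (by omega)]
        omega
      · rw [if_neg hN]
        have hqn : q ≤ 0 := by
          by_contra hqp
          push_neg at hqp
          have : 0 < K * q := mul_pos hK1 hqp
          omega
        omega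
  unfold PySem.List.pyRange
  rw [if_neg hK, hcount, hfd]
  exact List.map_congr_left (fun k _ => by push_cast; ring)

lemma pvClamp_nonneg (m : Nat) (x : Int) (h : 0 ≤ x) :
    (PySem.List.clampIdx m x : Int) = min x m := by
  unfold PySem.List.clampIdx
  split_ifs <;> omega

lemma pvClamp_neg (m : Nat) (x : Int) (h : x < 0) :
    (PySem.List.clampIdx m x : Int) = max 0 (m + x) := by
  unfold PySem.List.clampIdx
  split_ifs <;> omega

lemma pvSlice_empty_mono (S : String) (K a b : Int) (hK : K ≠ 0)
    (hcase : (0 < K ∧ 0 ≤ a ∧ a ≤ b) ∨ (K < 0 ∧ b ≤ K))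
    (h : PySem.Str.slice S (some a) (some (a + K)) = "") :
    PySem.Str.slice S (some b) (some (b + K)) = "" := by
  rw [← String.toList_inj] at h ⊢
  simp only [PySem.Str.toList_slice, PySem.Chars.slice, String.toList_empty] at h ⊢
  rw [← List.length_eq_zero_iff] at h ⊢
  rw [PySem.List.length_slice] at h ⊢
  rcases hcase with ⟨hKpos, ha, hab⟩ | ⟨hKneg, hbK⟩
  · have c1 := pvClamp_nonneg S.toList.length a ha
    have c2 := pvClamp_nonneg S.toList.length (a + K) (by omega)
    have c3 := pvClamp_nonneg S.toList.length b (by omega)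
    have c4 := pvClamp_nonneg S.toList.length (b + K) (by omega)
    omega
  · have c3 := pvClamp_neg S.toList.length b (by omega)
    have c4 := pvClamp_neg S.toList.length (b + K) (by omega)
    omega

def pvBlocksOf (S : String) (K : Int) (n : Nat) : List String :=
  (List.range n).map
    (fun (k : Nat) => PySem.Str.slice S (some (K * (k : Int))) (some (K * (k : Int) + K)))

lemma pvBlocksOf_length (S : String) (K : Int) (n : Nat) : (pvBlocksOf S K n).length = n := by
  simp [pvBlocksOf]

lemma pvBlocksOf_getElem (S : String) (K : Int) (n i : Nat) (h : i < (pvBlocksOf S K n).length) :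
    (pvBlocksOf S K n)[i]
      = PySem.Str.slice S (some (K * (i : Int))) (some (K * (i : Int) + K)) := by
  unfold pvBlocksOf
  rw [List.getElem_map, List.getElem_range]

lemma pvSP_of_getElem (L : List String)
    (h : ∀ i j (_ : i < L.length) (_ : j < L.length), i ≤ j → L[i] = "" → L[j] = "") :
    pvSP L := by
  intro p e r heq hp
  obtain ⟨i, hi, hpe⟩ := List.getElem_of_mem hp
  have hlen : L.length = p.length + 1 + r.length := by subst heq; simp; omega
  have hiL : i < L.length := by omega
  have hpL : p.length < L.length := by omega
  have h1 : L[i]'hiL = "" := by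
    subst heq
    rw [List.getElem_append_left hi]
    exact hpe
  have h2 : L[p.length]'hpL = e := by
    subst heq
    rw [List.getElem_append_right (le_refl p.length)]
    simp
  rw [← h2]
  exact h i p.length hiL hpL (le_of_lt hi) h1

lemma pvSP_blocks (S : String) (K : Int) (n : Nat) (hK : K ≠ 0) : pvSP (pvBlocksOf S K n) := by
  apply pvSP_of_getElem
  intro i j hi hj hij h0
  rw [pvBlocksOf_getElem S K n i hi] at h0
  rw [pvBlocksOf_getElem S K n j hj]
  rcases lt_trichotomy K 0 with hK1 | hK1 | hK1
  · rcases eq_or_lt_of_le hij with rfl | hij'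
    · exact h0
    · refine pvSlice_empty_mono S K (K * (i : Int)) (K * (j : Int)) hK (Or.inr ⟨hK1, ?_⟩) h0
      have hj1 : (1 : Int) ≤ (j : Int) := by exact_mod_cast Nat.one_le_iff_ne_zero.mpr (by omega)
      nlinarith
  · exact absurd hK1 hK
  · refine pvSlice_empty_mono S K (K * (i : Int)) (K * (j : Int)) hK (Or.inl ⟨hK1, ?_, ?_⟩) h0
    · exact mul_nonneg hK1.le (by positivity)
    · have hij2 : (i : Int) ≤ (j : Int) := by exact_mod_cast hij
      nlinarith

lemma pvFinal (S : String) (K q : Int) (hK : K ≠ 0) :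
    (let pat := PySem.Str.slice S (some 0) (some K);
     let st := ((List.range q.toNat).map (fun (k : Nat) => K * (k : Int))).foldl
       (fun st i => pvStepA pat st (PySem.Str.slice S (some i) (some (i + K))))
       ((0 : Int), (0 : Int), "");
     if (st.1 ≤ 1 ∨ st.2.1 ≤ 1) ∧ st.1 + st.2.1 = q then (1 : Int) else 0)
    = (let blocks := ((List.range q.toNat).map (fun (k : Nat) => K * (k : Int))).map
         (fun i => PySem.Str.slice S (some i) (some (i + K)));
       if (blocks.length : Int) ≠ q then 0
       else
         let counts := PySem.Dict.counter blocks
         if counts.size ≤ 1 then 1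
         else if counts.size = 2 ∧ counts.values.contains (1 : Int) then 1 else 0) := by
  have hbl : ((List.range q.toNat).map (fun (k : Nat) => K * (k : Int))).map
      (fun i => PySem.Str.slice S (some i) (some (i + K))) = pvBlocksOf S K q.toNat := by
    rw [List.map_map]
    rfl
  have hA : ((List.range q.toNat).map (fun (k : Nat) => K * (k : Int))).foldl
      (fun st i => pvStepA (PySem.Str.slice S (some 0) (some K)) st
        (PySem.Str.slice S (some i) (some (i + K)))) ((0 : Int), (0 : Int), "")
      = (pvBlocksOf S K q.toNat).foldl (pvStepA (PySem.Str.slice S (some 0) (some K)))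
        ((0 : Int), (0 : Int), "") := by
    unfold pvBlocksOf
    rw [List.foldl_map, List.foldl_map]
  simp only [hbl, hA]
  cases hn : q.toNat with
  | zero =>
    have hblocks : pvBlocksOf S K 0 = [] := rfl
    rw [hn] at *
    simp only [hblocks, List.foldl_nil, List.length_nil]
    by_cases hq : q = 0
    · subst hq
      decide
    · rw [if_neg (fun hcl => hq ((by simpa using hcl.2 : (0 : Int) = q)).symm),
        if_pos (show (((0 : Nat) : Int)) ≠ q from fun h => hq (by exact_mod_cast h.symm))]
  | succ m =>
    have hqpos : q = ((m + 1 : Nat) : Int) := by omega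
    obtain ⟨t', ht'⟩ : ∃ t', pvBlocksOf S K (m + 1)
        = (PySem.Str.slice S (some 0) (some K)) :: t' := by
      unfold pvBlocksOf
      rw [List.range_succ_eq_map]
      simp only [List.map_cons, Nat.cast_zero, mul_zero, zero_add]
      exact ⟨_, rfl⟩
    have hSPb : pvSP ((PySem.Str.slice S (some 0) (some K)) :: t') := by
      rw [← ht']
      exact pvSP_blocks S K (m + 1) hK
    have hlen : ((PySem.Str.slice S (some 0) (some K)) :: t').length = m + 1 := by
      rw [← ht']
      exact pvBlocksOf_length S K (m + 1)
    have hql : q = (((PySem.Str.slice S (some 0) (some K)) :: t').length : Int) := by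
      rw [hlen]
      exact_mod_cast hqpos
    rw [hn] at *
    rw [ht', hql]
    rw [if_neg (show ¬((((PySem.Str.slice S (some 0) (some K) :: t').length : Nat) : Int)
      ≠ (((PySem.Str.slice S (some 0) (some K) :: t').length : Nat) : Int)) from by simp)]
    exact pvMain (PySem.Str.slice S (some 0) (some K)) t' hSPb

-- ===== VERDICT (by name: the statement is the Claim_ definition above) =====
theorem can_form_k_repeated_substring_spec : Claim_equal_can_form_k_repeated_substring := by
  intro S N K hDom hPre
  unfold Spec_can_form_k_repeated_substring can_form_k_repeated_substring
    can_form_k_repeated_substring_alt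
  by_cases hm : PySem.Int.mod N K = 0
  · rw [if_neg (show ¬(PySem.Int.mod N K ≠ 0) from by simp [hm]),
      if_neg (show ¬(PySem.Int.mod N K ≠ 0) from by simp [hm])]
    rw [pvRange_spec N K hPre hm]
    exact pvFinal S K (PySem.Int.floordiv N K) hPre
  · rw [if_pos hm, if_pos hm]
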